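-- pv_equiv track=rewrite | github.com/kseenyoung/programmers | level1/대충 만든 자판.py | solution
-- ===== SOURCE A (Python) =====
-- def solution(keymap, targets):
--     # 문자 당 가장 작은 횟수
--     count = {}
--     for key in keymap:
--         for i, k in enumerate(key):
--             if k not in count or count[k] > i: #한 번도 만나지 않았거나 현재 위치가 저장했던 수보다 작을 때
--                 count[k] = i+1
--
--     # 입력할 문자열
--     answer = []
--     for tar in targets:
--         result = 0
--         temp = True
--         for t in tar:
--             if t in count:
--                 result += count[t]
--             else:
--                 temp = False
--                 answer.append(-1)
--                 break
--         if temp: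
--             answer.append(result)
--     return answer
-- ===== SOURCE B (Python) =====
-- def solution(keymap, targets):
--     def best(c):
--         b = None
--         for k in keymap:
--             p = k.find(c)
--             if p != -1 and (b is None or p + 1 < b):
--                 b = p + 1
--         return b
--
--     answer = []
--     for tar in targets:
--         total = 0
--         for t in tar:
--             b = best(t)
--             if b is None:
--                 total = -1
--                 break
--             total += b
--         answer.append(total)
--     return answer
-- ===== Notes on version B (the rewrite author's own statement) =====
-- stated objective: simpler
-- what changed: Drops A's precomputed position dictionary entirely: B scans the keymap list directly per target character, taking the minimum 1-based first index, and maps over targets instead of dict-building plus append folds.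
import Mathlib
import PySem

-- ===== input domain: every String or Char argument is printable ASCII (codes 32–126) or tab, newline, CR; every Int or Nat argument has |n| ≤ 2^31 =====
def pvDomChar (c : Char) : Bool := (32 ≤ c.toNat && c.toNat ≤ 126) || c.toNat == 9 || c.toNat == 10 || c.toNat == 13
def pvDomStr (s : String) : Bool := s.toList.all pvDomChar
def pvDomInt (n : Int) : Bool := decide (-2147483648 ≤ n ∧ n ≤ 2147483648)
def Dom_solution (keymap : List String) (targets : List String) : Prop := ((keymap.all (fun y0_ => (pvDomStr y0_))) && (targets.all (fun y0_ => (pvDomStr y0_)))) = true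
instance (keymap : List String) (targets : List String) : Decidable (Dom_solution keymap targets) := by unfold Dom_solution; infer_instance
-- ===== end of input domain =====

-- B drops A's precomputed min-position dictionary and instead scans the keymap directly per
-- target character (objective: simpler); same return value on every input.

-- ===== PORT A =====
-- inner dict-building loop: for i, k in enumerate(key): if k not in count or count[k] > i: count[k] = i+1
def aStep (count : PySem.Dict Char Int) (p : Int × Char) : PySem.Dict Char Int :=
  match count.get? p.2 with
  | none => count.insert p.2 (p.1 + 1)
  | some v => if v > p.1 then count.insert p.2 (p.1 + 1) else count

def aInner (count : PySem.Dict Char Int) (key : String) : PySem.Dict Char Int :=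
  (PySem.List.enumerate key.toList 0).foldl aStep count

-- the 'for t in tar' loop with result accumulator; none encodes the break (temp = False)
def aTar (count : PySem.Dict Char Int) (result : Int) : List Char → Option Int
  | [] => some result
  | t :: rest =>
    match count.get? t with
    | some v => aTar count (result + v) rest
    | none => none

def solution (keymap : List String) (targets : List String) : List Int :=
  let count := keymap.foldl aInner PySem.Dict.empty
  targets.foldl (fun answer tar =>
    match aTar count 0 tar.toList with
    | some r => answer ++ [r]
    | none => answer ++ [-1]) []

-- ===== PORT B =====
-- best(c): scan keymap keeping the smallest 1-based first position of c.
-- k.find(c) for a single character c is exact as index? on the char list (-1 when absent);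
-- the `and`/`or` of Source B's guard is ported as the equivalent nested conditional.
def bStep (c : Char) (b : Option Int) (k : String) : Option Int :=
  let p : Int := match PySem.List.index? k.toList c with
                 | some n => (n : Int)
                 | none => -1
  if p = -1 then b
  else match b with
       | none => some (p + 1)
       | some v => if p + 1 < v then some (p + 1) else b

def bBest (keymap : List String) (c : Char) : Option Int :=
  keymap.foldl (bStep c) none

def bTar (keymap : List String) (total : Int) : List Char → Int
  | [] => total
  | t :: rest =>
    match bBest keymap t with
    | none => -1
    | some v => bTar keymap (total + v) rest

def solution_alt (keymap : List String) (targets : List String) : List Int :=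
  targets.map (fun tar => bTar keymap 0 tar.toList)

-- ===== PRECONDITION & SPEC =====
def Spec_solution (keymap : List String) (targets : List String) (out : List Int) : Prop := out = solution_alt keymap targets
instance (keymap : List String) (targets : List String) (out : List Int) : Decidable (Spec_solution keymap targets out) := by unfold Spec_solution; infer_instance

-- ===== CLAIM (what is proved, stated in full; the proofs are below) =====
def Claim_equal_solution : Prop := ∀ (keymap : List String) (targets : List String), Dom_solution keymap targets → Spec_solution keymap targets (solution keymap targets)

-- ===== LEMMAS AND PROOFS =====

-- the common value-level step: update an optional minimum with candidate position i (0-based)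
def omin (b : Option Int) (i : Int) : Int :=
  match b with
  | none => i + 1
  | some v => if v > i then i + 1 else v

lemma omin_le (b : Option Int) (i : Int) : omin b i ≤ i + 1 := by
  cases b with
  | none => simp [omin]
  | some v => simp only [omin]; split <;> omega

-- A's inner fold over one key, per character
lemma aInner_get (c : Char) (l : List Char) : ∀ (s : Nat) (d : PySem.Dict Char Int),
    ((PySem.List.enumerate l (s : Int)).foldl aStep d).get? c =
      match PySem.List.index? l c with
      | none => d.get? c
      | some n => some (omin (d.get? c) ((s : Int) + (n : Int))) := by
  induction l with
  | nil => intro s d; simp [PySem.List.enumerate_nil, PySem.List.index?]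
  | cons hd tl ih =>
    intro s d
    rw [PySem.List.enumerate_cons, List.foldl_cons]
    have hcast : ((s : Int) + 1) = ((s + 1 : Nat) : Int) := by push_cast; ring
    by_cases hc : hd = c
    · subst hc
      have hstep : (aStep d ((s : Int), hd)).get? hd = some (omin (d.get? hd) (s : Int)) := by
        unfold aStep
        cases hd0 : d.get? hd with
        | none => simp [omin, PySem.Dict.get?_insert_self]
        | some v =>
          simp only [omin]
          split
          · simp [PySem.Dict.get?_insert_self]
          · simpa using hd0
      rw [hcast, ih (s + 1) (aStep d ((s : Int), hd)), hstep]
      rw [PySem.List.index?_cons_self]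
      cases hi : PySem.List.index? tl hd with
      | none => rfl
      | some m =>
        dsimp only
        have h0 : ((s : Int) + ((0 : Nat) : Int)) = (s : Int) := by push_cast; ring
        rw [h0]
        have h1 := omin_le (d.get? hd) (s : Int)
        set w := omin (d.get? hd) (s : Int) with hw
        have hred : omin (some w) (((s + 1 : Nat) : Int) + (m : Int)) = w := by
          simp only [omin]
          rw [if_neg (by push_cast; omega)]
        rw [hred]
    · have hne : hd ≠ c := hc
      have hstep : (aStep d ((s : Int), hd)).get? c = d.get? c := by
        unfold aStep
        cases d.get? hd with
        | none => simp [PySem.Dict.get?_insert_of_ne (hne := Ne.symm hne)]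
        | some v =>
          dsimp only; split
          · simp [PySem.Dict.get?_insert_of_ne (hne := Ne.symm hne)]
          · rfl
      rw [hcast, ih (s + 1) _, hstep, PySem.List.index?_cons_of_ne (h := hne)]
      cases hi : PySem.List.index? tl c with
      | none => rfl
      | some m =>
        simp only [Option.map_some]
        have harg : ((s + 1 : Nat) : Int) + (m : Int) = (s : Int) + ((m + 1 : Nat) : Int) := by
          push_cast; ring
        rw [harg]

-- B's per-key step equals A's, value-wise
lemma bStep_eq (b : Option Int) (k : String) (c : Char) :
    bStep c b k =
      match PySem.List.index? k.toList c with
      | none => b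
      | some n => some (omin b (n : Int)) := by
  unfold bStep
  cases hi : PySem.List.index? k.toList c with
  | none => simp
  | some n =>
    have hn : ¬ ((n : Int) = -1) := by omega
    simp only [hn, if_false]
    cases b with
    | none => simp [omin]
    | some v =>
      simp only [omin]
      by_cases hv : (n : Int) + 1 < v
      · rw [if_pos hv, if_pos (by omega)]
      · rw [if_neg hv]; congr 1; split <;> omega

-- folding A's dict build equals folding B's option-min, per character
lemma foldl_get_eq (c : Char) : ∀ (ks : List String) (d : PySem.Dict Char Int),
    (ks.foldl aInner d).get? c = ks.foldl (bStep c) (d.get? c) := by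
  intro ks
  induction ks with
  | nil => intro d; rfl
  | cons k tl ih =>
    intro d
    rw [List.foldl_cons, List.foldl_cons, ih (aInner d k)]
    congr 1
    show (aInner d k).get? c = bStep c (d.get? c) k
    unfold aInner
    rw [show (0 : Int) = ((0 : Nat) : Int) from rfl, aInner_get c k.toList 0 d, bStep_eq]
    cases PySem.List.index? k.toList c with
    | none => rfl
    | some n => simp

-- per-target agreement
lemma tar_eq (keymap : List String) (count : PySem.Dict Char Int)
    (hc : ∀ c, count.get? c = bBest keymap c) :
    ∀ (l : List Char) (acc : Int),
      (match aTar count acc l with | some r => r | none => -1) = bTar keymap acc l := by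
  intro l
  induction l with
  | nil => intro acc; rfl
  | cons t rest ih =>
    intro acc
    unfold aTar bTar
    rw [hc t]
    cases bBest keymap t with
    | none => rfl
    | some v => exact ih (acc + v)

-- ===== VERDICT (by name: the statement is the Claim_ definition above) =====
theorem solution_spec : Claim_equal_solution := by
  intro keymap targets hdom
  clear hdom
  show solution keymap targets = solution_alt keymap targets
  unfold solution solution_alt
  show List.foldl _ [] targets = _
  induction targets using List.reverseRecOn with
  | nil => rfl
  | append_singleton tl tar ih =>
    rw [List.foldl_append, List.map_append, ← ih]
    simp only [List.foldl_cons, List.foldl_nil, List.map_cons, List.map_nil]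
    have hc : ∀ c, (keymap.foldl aInner PySem.Dict.empty).get? c = bBest keymap c :=
      fun c => foldl_get_eq c keymap PySem.Dict.empty
    rw [← tar_eq keymap _ hc tar.toList 0]
    cases aTar (keymap.foldl aInner PySem.Dict.empty) 0 tar.toList <;> rfl
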